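-- pv_equiv track=rewrite | github.com/rootofminus1atu/Python-tings | Song Rankdowns/Sheet generator/testing.py | get_color_ranges
-- ===== SOURCE A (Python) =====
-- def get_color_ranges(length, colors):
--     colors_copy = colors.copy()
--     colors_copy.reverse()
--     color_list = []
--     for i in range(length):
--         color_list.append(colors_copy[i % len(colors_copy)])
--
--     final_list = []
--     jumpy_index = 0
--     tracker = 0
--     for i in range(length):
--         if jumpy_index >= length:
--             tracker += 1
--             jumpy_index = tracker
--
--         final_list.append(color_list[jumpy_index])
--
--         jumpy_index += len(colors_copy)
--
--     final_list.reverse()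
--     return final_list
-- ===== SOURCE B (Python) =====
-- def get_color_ranges(length, colors):
--     # Each color occupies one contiguous run in the output; compute each run
--     # length in closed form instead of simulating the jumpy-index traversal.
--     if length <= 0:
--         return []
--     n = len(colors)
--     out = []
--     for s, col in enumerate(colors):
--         t = n - 1 - s
--         count = (length - 1 - t) // n + 1 if t < length else 0
--         out += [col] * count
--     return out
-- ===== Notes on version B (the rewrite author's own statement) =====
-- stated objective: simpler
-- what changed: B replaces A's two-pass construction (cyclically-indexed color_list plus the jumpy_index/tracker state machine and final reverse) by a single pass over colors that emits each color's contiguous run directly, with the run length computed in closed form ((length-1-t)//n + 1).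
-- crash fix: On length > 0 with colors == [], A raises ZeroDivisionError (i % 0 while building color_list); B returns []. — e.g. on get_color_ranges(2, []): A raises ZeroDivisionError, B returns []
import Mathlib
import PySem

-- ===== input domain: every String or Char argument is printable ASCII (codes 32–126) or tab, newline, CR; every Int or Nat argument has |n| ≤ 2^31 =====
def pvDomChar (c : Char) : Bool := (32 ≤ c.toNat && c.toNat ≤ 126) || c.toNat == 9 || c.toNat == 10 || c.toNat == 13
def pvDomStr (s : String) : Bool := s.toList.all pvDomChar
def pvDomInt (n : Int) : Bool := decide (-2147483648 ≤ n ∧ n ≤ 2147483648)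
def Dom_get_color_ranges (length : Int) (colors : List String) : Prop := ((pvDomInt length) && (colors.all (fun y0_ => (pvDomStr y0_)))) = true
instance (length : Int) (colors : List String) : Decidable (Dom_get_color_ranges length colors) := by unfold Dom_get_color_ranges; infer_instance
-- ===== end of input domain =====

-- B replaces A's two-pass jumpy-index state machine by one pass over colors emitting
-- each color's contiguous run, with the run length in closed form (objective: simpler).

-- ===== PORT A =====
-- the body of A's second for-loop (the loop variable i is unused by the body)
def pvStep (length : Int) (n : Int) (color_list : List String) (s : List String × Int × Int) :
    List String × Int × Int :=
  if s.2.1 ≥ length then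
    (s.1 ++ [PySem.List.pyGetD color_list (s.2.2 + 1) ""], s.2.2 + 1 + n, s.2.2 + 1)
  else
    (s.1 ++ [PySem.List.pyGetD color_list s.2.1 ""], s.2.1 + n, s.2.2)

def get_color_ranges (length : Int) (colors : List String) : List String :=
  let colors_copy := colors.reverse
  let color_list := (PySem.List.pyRange 0 length 1).foldl
      (fun acc i => acc ++ [PySem.List.pyGetD colors_copy (PySem.Int.mod i (colors_copy.length : Int)) ""]) []
  let res := (PySem.List.pyRange 0 length 1).foldl
      (fun s _ => pvStep length (colors_copy.length : Int) color_list s) ([], 0, 0)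
  res.1.reverse

-- ===== PORT B =====
def get_color_ranges_alt (length : Int) (colors : List String) : List String :=
  if length ≤ 0 then []
  else
    (PySem.List.enumerate colors).foldl
      (fun out sc =>
        let t : Int := (colors.length : Int) - 1 - sc.1
        let count : Int :=
          if t < length then PySem.Int.floordiv (length - 1 - t) (colors.length : Int) + 1 else 0
        out ++ PySem.List.pyRepeat [sc.2] count) []

-- ===== PRECONDITION & SPEC =====
-- Pre_ excludes only positive length with empty colors, where A raises ZeroDivisionError (i % 0).
def Pre_get_color_ranges (length : Int) (colors : List String) : Prop :=
  length ≤ 0 ∨ colors ≠ []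
instance (length : Int) (colors : List String) : Decidable (Pre_get_color_ranges length colors) := by
  unfold Pre_get_color_ranges; infer_instance
def pvWitness_get_color_ranges : Int × List String := (7, ["a", "b", "c"])

-- On length > 0 with colors == [], A raises ZeroDivisionError (i % 0 while building color_list); B returns [].
def Raises_get_color_ranges (length : Int) (colors : List String) : Prop :=
  0 < length ∧ colors = []
instance (length : Int) (colors : List String) : Decidable (Raises_get_color_ranges length colors) := by
  unfold Raises_get_color_ranges; infer_instance
def pvRaiseWitness_get_color_ranges : Int × List String := (2, [])
def pvRaiseWitnessOut_get_color_ranges : List String := []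

def Spec_get_color_ranges (length : Int) (colors : List String) (out : List String) : Prop :=
  out = get_color_ranges_alt length colors
instance (length : Int) (colors : List String) (out : List String) : Decidable (Spec_get_color_ranges length colors out) := by
  unfold Spec_get_color_ranges; infer_instance

-- ===== CLAIM (what is proved, stated in full; the proofs are below) =====
def Claim_equal_get_color_ranges : Prop := ∀ (length : Int) (colors : List String), Dom_get_color_ranges length colors → Pre_get_color_ranges length colors → Spec_get_color_ranges length colors (get_color_ranges length colors)
def Claim_raises_get_color_ranges : Prop := (∀ (length : Int) (colors : List String), Dom_get_color_ranges length colors → Raises_get_color_ranges length colors → ¬ Pre_get_color_ranges length colors) ∧ (Dom_get_color_ranges (pvRaiseWitness_get_color_ranges.1) (pvRaiseWitness_get_color_ranges.2) ∧ Raises_get_color_ranges (pvRaiseWitness_get_color_ranges.1) (pvRaiseWitness_get_color_ranges.2) ∧ get_color_ranges_alt (pvRaiseWitness_get_color_ranges.1) (pvRaiseWitness_get_color_ranges.2) = pvRaiseWitnessOut_get_color_ranges)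

-- ===== LEMMAS AND PROOFS =====

-- run length of color t (= colors.reverse[t]) in A's output read back-to-front:
-- the number of j < L with j ≡ t (mod n)
def pvCnt (L n t : ℕ) : ℕ := if t < L then (L - 1 - t) / n + 1 else 0

-- what remains to be appended when A's loop is at column t, position k
def pvSuffix (L n : ℕ) (colors : List String) (t k : ℕ) : List String :=
  List.replicate (pvCnt L n t - k) (colors.reverse.getD t "") ++
    ((List.range n).drop (t + 1)).flatMap
      (fun t' => List.replicate (pvCnt L n t') (colors.reverse.getD t' ""))

lemma pv_foldl_fun_const {α β : Type} (f : α → α) (l : List β) (init : α) :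
    l.foldl (fun s _ => f s) init = f^[l.length] init := by
  induction l generalizing init with
  | nil => rfl
  | cons x t ih => simpa [Function.iterate_succ_apply] using ih (f init)

lemma pv_sum_indicator (l : List ℕ) (v : ℕ) :
    (l.map (fun t => if t = v then (1 : ℕ) else 0)).sum = l.count v := by
  induction l with
  | nil => rfl
  | cons x t ih =>
    by_cases h : x = v <;> simp [h, ih, Nat.add_comm]

lemma pv_dvd_sub_iff (L t n : ℕ) (ht : t < n) (hle : t ≤ L) :
    n ∣ (L - t) ↔ L % n = t := by
  constructor
  · rintro ⟨c, hc⟩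
    have hL : L = t + n * c := by omega
    rw [hL, Nat.add_mul_mod_self_left, Nat.mod_eq_of_lt ht]
  · intro h
    have := Nat.div_add_mod L n
    exact ⟨L / n, by omega⟩

lemma pv_cnt_succ (L n t : ℕ) (ht : t < n) :
    pvCnt (L + 1) n t = pvCnt L n t + (if t = L % n then 1 else 0) := by
  by_cases h1 : t < L
  · have he : L - t = (L - 1 - t) + 1 := by omega
    have hsd := @Nat.succ_div (L - 1 - t) n
    rw [← he] at hsd
    have hd := pv_dvd_sub_iff L t n ht (Nat.le_of_lt h1)
    simp only [pvCnt, Nat.add_sub_cancel, if_pos h1, if_pos (show t < L + 1 by omega)]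
    by_cases h2 : t = L % n
    · rw [if_pos h2, hsd, if_pos (hd.mpr h2.symm)]
    · rw [if_neg h2, hsd, if_neg (fun hdv => h2 ((hd.mp hdv).symm))]
  · by_cases h0 : t < L + 1
    · have htL : t = L := by omega
      simp only [pvCnt, Nat.add_sub_cancel, if_pos h0, if_neg h1,
        if_pos (show t = L % n by rw [htL, Nat.mod_eq_of_lt (htL ▸ ht)])]
      simp [htL]
    · simp only [pvCnt, if_neg h0, if_neg h1,
        if_neg (show ¬ t = L % n by have := Nat.mod_le L n; omega)]

lemma pv_cnt_total (L n : ℕ) (hn : 0 < n) :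
    ((List.range n).map (pvCnt L n)).sum = L := by
  induction L with
  | zero =>
    apply List.sum_eq_zero_iff.mpr
    intro x hx
    simp only [List.mem_map] at hx
    obtain ⟨t, _, rfl⟩ := hx
    simp [pvCnt]
  | succ L ih =>
    have hcong : (List.range n).map (pvCnt (L + 1) n) =
        (List.range n).map (fun t => pvCnt L n t + (if t = L % n then 1 else 0)) := by
      apply List.map_congr_left
      intro t htm
      exact pv_cnt_succ L n t (List.mem_range.mp htm)
    rw [hcong, List.sum_map_add, ih, pv_sum_indicator, List.count_range,
      if_pos (Nat.mod_lt L hn)]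

lemma pv_cnt_bound (L n t k : ℕ) (hn : 0 < n) :
    t + k * n < L ↔ k < pvCnt L n t := by
  unfold pvCnt
  by_cases h : t < L
  · rw [if_pos h]
    constructor
    · intro hlt
      have : k ≤ (L - 1 - t) / n := (Nat.le_div_iff_mul_le hn).mpr (by omega)
      omega
    · intro hk
      have : k ≤ (L - 1 - t) / n := by omega
      have := (Nat.le_div_iff_mul_le hn).mp this
      omega
  · rw [if_neg h]
    constructor
    · intro hlt; omega
    · intro hk; omega

-- the elements of color_list: position j holds colors.reverse[j % n]
lemma pv_cl_getD (L n j : ℕ) (colors : List String) (hj : j < L) :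
    ((List.range L).map (fun i => colors.reverse.getD (i % n) "")).getD j "" =
      colors.reverse.getD (j % n) "" := by
  rw [List.getD_eq_getElem?_getD, List.getElem?_map, List.getElem?_range hj]
  rfl

-- main loop invariant: from column t, position k, the loop appends exactly pvSuffix t k
lemma pv_loop (L n : ℕ) (hn : 0 < n) (colors : List String) (hcol : colors.length = n)
    (cl : List String) (hcl : cl = (List.range L).map (fun i => colors.reverse.getD (i % n) "")) :
    ∀ m t k (acc : List String), t < n →
      m = (pvCnt L n t - k) + (((List.range n).drop (t + 1)).map (pvCnt L n)).sum →
      ((pvStep (L : Int) (n : Int) cl)^[m] (acc, ((t + k * n : ℕ) : Int), (t : Int))).1 =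
        acc ++ pvSuffix L n colors t k := by
  intro m
  induction m with
  | zero =>
    intro t k acc ht hm
    simp only [Function.iterate_zero, id_eq]
    suffices h : pvSuffix L n colors t k = [] by rw [h, List.append_nil]
    unfold pvSuffix
    rw [show pvCnt L n t - k = 0 by omega]
    simp only [List.replicate_zero, List.nil_append]
    apply List.flatMap_eq_nil_iff.mpr
    intro t' ht'
    have h0 : pvCnt L n t' = 0 :=
      List.sum_eq_zero_iff.mp (by omega) _ (List.mem_map_of_mem ht')
    simp [h0]
  | succ m ih =>
    intro t k acc ht hm
    rw [Function.iterate_succ_apply]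
    by_cases hk : k < pvCnt L n t
    · -- jumpy is still in range: append column t's next element
      have hjl : t + k * n < L := (pv_cnt_bound L n t k hn).mpr hk
      have hget : PySem.List.pyGetD cl (((t + k * n : ℕ) : Int)) "" = colors.reverse.getD t "" := by
        rw [PySem.List.pyGetD_natCast, hcl, pv_cl_getD L n _ colors hjl,
          Nat.add_mul_mod_self_right, Nat.mod_eq_of_lt ht]
      have hstep : pvStep (L : Int) (n : Int) cl (acc, ((t + k * n : ℕ) : Int), (t : Int)) =
          (acc ++ [colors.reverse.getD t ""], ((t + (k + 1) * n : ℕ) : Int), (t : Int)) := by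
        unfold pvStep
        rw [if_neg (by push_cast; omega)]
        have hj : ((t + k * n : ℕ) : Int) + (n : Int) = ((t + (k + 1) * n : ℕ) : Int) := by
          push_cast; ring
        rw [hget, hj]
      rw [hstep, ih t (k + 1) _ ht (by omega)]
      unfold pvSuffix
      rw [show pvCnt L n t - k = (pvCnt L n t - (k + 1)) + 1 by omega, List.replicate_succ]
      simp
    · -- jumpy ran past length: reset to column t + 1 and append its first element
      have hge : L ≤ t + k * n := by
        by_contra h
        exact hk ((pv_cnt_bound L n t k hn).mp (by omega))
      have hc0 : pvCnt L n t - k = 0 := by omega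
      have hsum : (((List.range n).drop (t + 1)).map (pvCnt L n)).sum = m + 1 := by omega
      have ht1 : t + 1 < n := by
        by_contra h
        have hnil : (List.range n).drop (t + 1) = [] := by
          rw [List.range_eq_range', List.drop_range']
          simp [show n - (t + 1) = 0 by omega]
        rw [hnil] at hsum
        simp only [List.map_nil, List.sum_nil] at hsum
        omega
      have hdrop : (List.range n).drop (t + 1) = (t + 1) :: (List.range n).drop (t + 1 + 1) := by
        rw [List.range_eq_range', List.drop_range', List.drop_range',
          show n - (t + 1) = (n - (t + 1 + 1)) + 1 by omega, List.range'_succ]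
        simp
      have hcnt1 : 0 < pvCnt L n (t + 1) := by
        by_contra h
        have hL1 : L ≤ t + 1 := by
          unfold pvCnt at h
          by_cases hx : t + 1 < L
          · rw [if_pos hx] at h
            exact absurd (Nat.succ_pos _) h
          · omega
        have hz : (((List.range n).drop (t + 1)).map (pvCnt L n)).sum = 0 := by
          apply List.sum_eq_zero_iff.mpr
          intro x hx
          obtain ⟨t', ht', rfl⟩ := List.mem_map.mp hx
          rw [List.range_eq_range', List.drop_range'] at ht'
          have hb := (List.mem_range'_1.mp ht').1
          unfold pvCnt
          rw [if_neg (by omega)]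
        omega
      have hL1 : t + 1 < L := by
        unfold pvCnt at hcnt1
        by_cases hx : t + 1 < L
        · exact hx
        · rw [if_neg hx] at hcnt1; omega
      have hget : PySem.List.pyGetD cl ((t : Int) + 1) "" = colors.reverse.getD (t + 1) "" := by
        rw [show (t : Int) + 1 = ((t + 1 : ℕ) : Int) by push_cast; ring,
          PySem.List.pyGetD_natCast, hcl, pv_cl_getD L n _ colors hL1,
          Nat.mod_eq_of_lt ht1]
      have hstep : pvStep (L : Int) (n : Int) cl (acc, ((t + k * n : ℕ) : Int), (t : Int)) =
          (acc ++ [colors.reverse.getD (t + 1) ""], (((t + 1) + 1 * n : ℕ) : Int), ((t + 1 : ℕ) : Int)) := by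
        unfold pvStep
        rw [if_pos (by push_cast; omega)]
        have hj : (t : Int) + 1 + (n : Int) = (((t + 1) + 1 * n : ℕ) : Int) := by
          push_cast; ring
        have htr : (t : Int) + 1 = ((t + 1 : ℕ) : Int) := by push_cast; ring
        rw [hget, hj, htr]
      have hm' : m = (pvCnt L n (t + 1) - 1) + (((List.range n).drop ((t + 1) + 1)).map (pvCnt L n)).sum := by
        rw [hdrop] at hsum
        simp only [List.map_cons, List.sum_cons] at hsum
        omega
      have hsfx : pvSuffix L n colors t k =
          colors.reverse.getD (t + 1) "" :: pvSuffix L n colors (t + 1) 1 := by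
        unfold pvSuffix
        rw [hc0, hdrop]
        obtain ⟨c, hcq⟩ : ∃ c, pvCnt L n (t + 1) = c + 1 := ⟨pvCnt L n (t + 1) - 1, by omega⟩
        simp only [List.replicate_zero, List.nil_append, List.flatMap_cons]
        rw [hcq, List.replicate_succ]
        simp
      rw [hstep, ih (t + 1) 1 _ ht1 hm', hsfx]
      simp

lemma pv_enumerate (xs : List String) (s : Int) :
    PySem.List.enumerate xs s =
      (List.range xs.length).map (fun i : ℕ => ((s + (i : Int), xs.getD i ""))) := by
  induction xs generalizing s with
  | nil => simp [PySem.List.enumerate_nil]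
  | cons x tl ih =>
    rw [PySem.List.enumerate_cons, ih (s + 1)]
    simp only [List.length_cons, List.range_succ_eq_map, List.map_cons, List.map_map]
    congr 1
    · simp
    · apply List.map_congr_left
      intro i _
      simp only [Function.comp_apply, Nat.succ_eq_add_one, List.getD_cons_succ]
      simp only [Prod.mk.injEq]
      exact ⟨by push_cast; ring, by trivial⟩

-- B unfolded to a flatMap of runs over the column indices, read back-to-front
lemma pv_alt_eq (length : Int) (colors : List String) (h : 0 < length) :
    get_color_ranges_alt length colors =
      ((List.range colors.length).flatMap
        (fun t => List.replicate (pvCnt length.toNat colors.length t)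
          (colors.reverse.getD t ""))).reverse := by
  unfold get_color_ranges_alt
  rw [if_neg (by omega)]
  simp only [PySem.List.foldl_append_eq_flatMap, List.nil_append]
  rw [pv_enumerate colors 0, List.flatMap_map]
  -- rewrite the reversed right-hand side as a flatMap over reversed indices
  rw [List.reverse_flatMap]
  have hrev : (List.range colors.length).reverse =
      (List.range colors.length).map (fun i => colors.length - 1 - i) := by
    rw [List.range_eq_range', List.reverse_range']
    simp
    rw [List.range_eq_range']
  rw [hrev, List.flatMap_map]
  apply List.flatMap_congr
  intro i hi
  have hi' : i < colors.length := List.mem_range.mp hi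
  have hL : length = (length.toNat : Int) := by omega
  have ht' : ((colors.length : Int) - 1 - (0 + (i : Int))) = ((colors.length - 1 - i : ℕ) : Int) := by
    push_cast [Nat.sub_sub]; omega
  simp only [Function.comp_apply, List.reverse_replicate, ht']
  have hcount : (if ((colors.length - 1 - i : ℕ) : Int) < length
        then PySem.Int.floordiv (length - 1 - ((colors.length - 1 - i : ℕ) : Int)) (colors.length : Int) + 1
        else 0).toNat = pvCnt length.toNat colors.length (colors.length - 1 - i) := by
    by_cases hx : colors.length - 1 - i < length.toNat
    · rw [if_pos (by omega), pvCnt, if_pos hx]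
      have : length - 1 - ((colors.length - 1 - i : ℕ) : Int) =
          ((length.toNat - 1 - (colors.length - 1 - i) : ℕ) : Int) := by
        push_cast [Nat.sub_sub]; omega
      rw [this, PySem.Int.floordiv_natCast,
        show ((((length.toNat - 1 - (colors.length - 1 - i)) / colors.length : ℕ) : Int)) + 1 =
          (((length.toNat - 1 - (colors.length - 1 - i)) / colors.length + 1 : ℕ) : Int) by push_cast; ring,
        Int.toNat_natCast]
    · rw [if_neg (by omega), pvCnt, if_neg hx]
      rfl
  have hget : colors.reverse.getD (colors.length - 1 - i) "" = colors.getD i "" := by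
    rw [List.getD_reverse (colors.length - 1 - i) (by omega),
      show colors.length - 1 - (colors.length - 1 - i) = i by omega]
  rw [PySem.List.pyRepeat_singleton, hcount, hget]

-- A unfolded to the same flatMap, via the loop invariant pv_loop
lemma pv_a_eq (length : Int) (colors : List String) (h : 0 < length) (hne : colors ≠ []) :
    get_color_ranges length colors =
      ((List.range colors.length).flatMap
        (fun t => List.replicate (pvCnt length.toNat colors.length t)
          (colors.reverse.getD t ""))).reverse := by
  have hn : 0 < colors.length := List.length_pos_iff.mpr hne
  obtain ⟨L, rfl⟩ : ∃ L : ℕ, length = (L : Int) := ⟨length.toNat, by omega⟩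
  simp only [Int.toNat_natCast]
  unfold get_color_ranges
  simp only [List.length_reverse]
  rw [PySem.List.pyRange_zero_natCast, List.foldl_map, List.foldl_map]
  rw [PySem.List.foldl_append_singleton_eq_map
    (f := fun i : ℕ => PySem.List.pyGetD colors.reverse (PySem.Int.mod (i : Int) (colors.length : Int)) "")]
  have hcl : List.map (fun i : ℕ => PySem.List.pyGetD colors.reverse (PySem.Int.mod (i : Int) (colors.length : Int)) "") (List.range L) =
      List.map (fun i => colors.reverse.getD (i % colors.length) "") (List.range L) := by
    apply List.map_congr_left
    intro i _
    rw [PySem.Int.mod_natCast, PySem.List.pyGetD_natCast]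
  rw [List.nil_append, hcl]
  rw [pv_foldl_fun_const]
  simp only [List.length_range]
  have hstart := pv_loop L colors.length hn colors rfl _ rfl
    L 0 0 [] hn ?_
  · have h00 : ((0 : Int), (0 : Int)) = (((0 + 0 * colors.length : ℕ) : Int), ((0 : ℕ) : Int)) := by
      norm_num
    rw [h00, hstart, List.nil_append]
    have hfull : pvSuffix L colors.length colors 0 0 =
        (List.range colors.length).flatMap
          (fun t => List.replicate (pvCnt L colors.length t) (colors.reverse.getD t "")) := by
      unfold pvSuffix
      have hdrop0 : List.range colors.length = 0 :: (List.range colors.length).drop 1 := by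
        rw [List.range_eq_range', List.drop_range',
          show colors.length = (colors.length - 1) + 1 by omega, List.range'_succ]
        simp
      conv_rhs => rw [hdrop0]
      simp
    rw [hfull]
  · -- total count over all columns is L
    have hdrop0 : List.range colors.length = 0 :: (List.range colors.length).drop 1 := by
      rw [List.range_eq_range', List.drop_range',
        show colors.length = (colors.length - 1) + 1 by omega, List.range'_succ]
      simp
    have htot := pv_cnt_total L colors.length hn
    rw [hdrop0] at htot
    simp only [List.map_cons, List.sum_cons] at htot
    simp only [Nat.zero_add]
    omega

theorem get_color_ranges_spec : Claim_equal_get_color_ranges := by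
  unfold Claim_equal_get_color_ranges
  intro length colors _ hpre
  unfold Spec_get_color_ranges
  by_cases h : 0 < length
  · have hne : colors ≠ [] := by
      rcases hpre with h0 | h0
      · omega
      · exact h0
    rw [pv_a_eq length colors h hne, pv_alt_eq length colors h]
  · unfold get_color_ranges get_color_ranges_alt
    rw [if_pos (by omega)]
    have hr : PySem.List.pyRange 0 length 1 = [] := by
      rw [PySem.List.pyRange_of_pos 0 length (by norm_num), if_neg (by omega)]
      simp
    simp [hr]

@[simp]
theorem get_color_ranges_raises : Claim_raises_get_color_ranges := by
  unfold Claim_raises_get_color_ranges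
  constructor
  · intro length colors _ hr
    unfold Pre_get_color_ranges
    unfold Raises_get_color_ranges at hr
    simp [hr.2]; omega
  · exact ⟨by decide, by decide, by decide⟩
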